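-- pv_equiv track=rewrite | github.com/TrentCarter/lnsp-phase-4 | tools/semantic_vector_arithmetic_eval.py | build_article_index
-- ===== SOURCE A (Python) =====
-- from typing import Dict, List, Optional, Sequence, Tuple
--
-- def build_article_index(batch_ids: Sequence[str], seq: Sequence[int]) -> Dict[str, List[Tuple[int, int]]]:
--     """Group vector indices by article, sorted by sequence order."""
--
--     mapping: Dict[str, List[Tuple[int, int]]] = {}
--     for global_idx, (article_id, position) in enumerate(zip(batch_ids, seq)):
--         mapping.setdefault(article_id, []).append((position, global_idx))
--
--     for article_id, pairs in mapping.items():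
--         pairs.sort(key=lambda pair: pair[0])
--         mapping[article_id] = pairs
--     return mapping
-- ===== SOURCE B (Python) =====
-- def build_article_index(batch_ids, seq):
--     """Group vector indices by article, sorted by sequence order."""
--     entries = [(position, global_idx, article_id)
--                for global_idx, (article_id, position) in enumerate(zip(batch_ids, seq))]
--     entries.sort(key=lambda e: e[0])  # one stable global sort on position
--     mapping = {article_id: [] for article_id, _ in zip(batch_ids, seq)}
--     for position, global_idx, article_id in entries:
--         mapping[article_id].append((position, global_idx))
--     return mapping
-- ===== Notes on version B (the rewrite author's own statement) =====
-- stated objective: alternative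
-- what changed: Replaces A's per-bucket sorting of each article's list with one stable global sort of all (position, global_idx, article_id) entries keyed on position alone, followed by a single bucketing pass into a pre-keyed dict.
import Mathlib
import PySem

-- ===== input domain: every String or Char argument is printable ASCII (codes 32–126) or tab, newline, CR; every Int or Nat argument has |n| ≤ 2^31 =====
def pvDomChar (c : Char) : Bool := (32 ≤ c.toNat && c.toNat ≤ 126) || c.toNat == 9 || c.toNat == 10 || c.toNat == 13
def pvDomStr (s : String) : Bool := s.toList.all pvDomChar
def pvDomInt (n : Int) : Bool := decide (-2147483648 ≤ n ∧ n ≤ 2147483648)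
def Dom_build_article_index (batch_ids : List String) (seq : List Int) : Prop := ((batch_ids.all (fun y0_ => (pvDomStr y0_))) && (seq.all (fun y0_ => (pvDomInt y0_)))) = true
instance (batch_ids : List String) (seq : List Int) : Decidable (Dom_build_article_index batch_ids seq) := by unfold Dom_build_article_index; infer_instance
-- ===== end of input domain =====

-- B replaces A's per-bucket sorting with one stable global sort on position followed by a
-- bucketing pass into a pre-keyed dict (alternative decomposition, same asymptotic cost).


-- ===== PORT A =====
-- mapping.setdefault(aid, []).append((pos, i)) is exactly Dict.modify aid [] (· ++ [(pos, i)]);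
-- the second loop reassigns each existing key to its sorted pairs (insert overwrites in place).
def build_article_index (batch_ids : List String) (seq : List Int) : List (String × List (Int × Int)) :=
  let mapping : PySem.Dict String (List (Int × Int)) :=
    (PySem.List.enumerate (batch_ids.zip seq)).foldl
      (fun d p => d.modify p.2.1 [] (fun l => l ++ [(p.2.2, p.1)])) PySem.Dict.empty
  let mapping2 :=
    mapping.items.foldl
      (fun d p => d.insert p.1 (PySem.List.sorted p.2 (fun pair => pair.1))) mapping
  mapping2.items

-- ===== PORT B =====
-- mapping[aid].append(...): aid is always a pre-registered key, so Dict.modify aid [] is exact.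
def build_article_index_alt (batch_ids : List String) (seq : List Int) : List (String × List (Int × Int)) :=
  let entries :=
    (PySem.List.enumerate (batch_ids.zip seq)).map (fun p => (p.2.2, p.1, p.2.1))
  let sortedEntries := PySem.List.sorted entries (fun e => e.1)
  let mapping : PySem.Dict String (List (Int × Int)) :=
    (batch_ids.zip seq).foldl
      (fun d p => d.insert p.1 ([] : List (Int × Int))) PySem.Dict.empty
  let mapping2 :=
    sortedEntries.foldl
      (fun d e => d.modify e.2.2 [] (fun l => l ++ [(e.1, e.2.1)])) mapping
  mapping2.items

-- ===== PRECONDITION & SPEC =====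
def Spec_build_article_index (batch_ids : List String) (seq : List Int) (out : List (String × List (Int × Int))) : Prop := out = build_article_index_alt batch_ids seq
instance (batch_ids : List String) (seq : List Int) (out : List (String × List (Int × Int))) : Decidable (Spec_build_article_index batch_ids seq out) := by unfold Spec_build_article_index; infer_instance

-- ===== CLAIM (what is proved, stated in full; the proofs are below) =====
def Claim_equal_build_article_index : Prop := ∀ (batch_ids : List String) (seq : List Int), Dom_build_article_index batch_ids seq → Spec_build_article_index batch_ids seq (build_article_index batch_ids seq)

-- ===== LEMMAS AND PROOFS =====

-- STABILITY of PySem.List.sorted: if a secondary key k2 is strictly increasing among equal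
-- primary keys k1 in the input, the output is strictly increasing under (k1, k2)-lex order.
theorem pv_insertBy_pairwise_lex {α : Type} (k1 k2 : α → Int) (x : α) (acc : List α)
    (hacc : acc.Pairwise (fun a b => k1 a < k1 b ∨ (k1 a = k1 b ∧ k2 a < k2 b)))
    (hx : ∀ a ∈ acc, k1 a = k1 x → k2 a < k2 x) :
    (PySem.List.insertBy (fun a b => decide (k1 a < k1 b)) x acc).Pairwise
      (fun a b => k1 a < k1 b ∨ (k1 a = k1 b ∧ k2 a < k2 b)) := by
  induction acc with
  | nil => simp [PySem.List.insertBy]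
  | cons y t ih =>
    rw [List.pairwise_cons] at hacc
    obtain ⟨hy, ht⟩ := hacc
    by_cases hlt : k1 x < k1 y
    · simp only [PySem.List.insertBy, hlt, decide_true, if_true]
      refine List.Pairwise.cons ?_ (List.Pairwise.cons hy ht)
      intro z hz
      rcases List.mem_cons.mp hz with rfl | hz
      · exact Or.inl hlt
      · rcases hy z hz with h | ⟨h, _⟩
        · exact Or.inl (lt_trans hlt h)
        · exact Or.inl (h ▸ hlt)
    · simp only [PySem.List.insertBy, hlt, decide_false]
      refine List.Pairwise.cons ?_ (ih ht (fun a ha h => hx a (List.mem_cons_of_mem y ha) h))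
      intro z hz
      rw [PySem.List.mem_insertBy] at hz
      rcases hz with rfl | hz
      · rcases lt_or_eq_of_le (not_lt.mp hlt) with h | h
        · exact Or.inl h
        · exact Or.inr ⟨h, hx y List.mem_cons_self h⟩
      · exact hy z hz

theorem pv_foldl_insertBy_pairwise_lex {α : Type} (k1 k2 : α → Int) (xs acc : List α)
    (hacc : acc.Pairwise (fun a b => k1 a < k1 b ∨ (k1 a = k1 b ∧ k2 a < k2 b)))
    (hcross : ∀ a ∈ acc, ∀ b ∈ xs, k1 a = k1 b → k2 a < k2 b)
    (hxs : xs.Pairwise (fun a b => k1 a = k1 b → k2 a < k2 b)) :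
    (xs.foldl (fun acc x => PySem.List.insertBy (fun a b => decide (k1 a < k1 b)) x acc) acc).Pairwise
      (fun a b => k1 a < k1 b ∨ (k1 a = k1 b ∧ k2 a < k2 b)) := by
  induction xs generalizing acc with
  | nil => exact hacc
  | cons x t ih =>
    rw [List.pairwise_cons] at hxs
    obtain ⟨hxh, hxt⟩ := hxs
    refine ih _ (pv_insertBy_pairwise_lex k1 k2 x acc hacc
      (fun a ha h => hcross a ha x List.mem_cons_self h)) ?_ hxt
    intro a ha b hb h
    rw [PySem.List.mem_insertBy] at ha
    rcases ha with rfl | ha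
    · exact hxh b hb h
    · exact hcross a ha b (List.mem_cons_of_mem x hb) h

theorem pv_sorted_pairwise_lex {α : Type} (k1 k2 : α → Int) (xs : List α)
    (hxs : xs.Pairwise (fun a b => k1 a = k1 b → k2 a < k2 b)) :
    (PySem.List.sorted xs k1).Pairwise
      (fun a b => k1 a < k1 b ∨ (k1 a = k1 b ∧ k2 a < k2 b)) := by
  rw [PySem.List.sorted_eq_foldl_insertBy]
  exact pv_foldl_insertBy_pairwise_lex k1 k2 xs [] List.Pairwise.nil (by simp) hxs

-- getD after A's rewrite loop: the first (unique) matching item's value, transformed.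
theorem pv_getD_foldl_insert_find {ν : Type} (l : List (String × ν)) (g : ν → ν)
    (a : PySem.Dict String ν) (k : String) (dflt : ν)
    (hnd : (l.map (·.1)).Nodup) :
    (l.foldl (fun d p => d.insert p.1 (g p.2)) a).getD k dflt =
      match l.find? (fun p => p.1 == k) with
      | some p => g p.2
      | none => a.getD k dflt := by
  induction l generalizing a with
  | nil => simp
  | cons q t ih =>
    simp only [List.map_cons, List.nodup_cons] at hnd
    obtain ⟨hq, hnd⟩ := hnd
    simp only [List.foldl_cons, List.find?_cons]
    by_cases hk : q.1 = k
    · have hfind : t.find? (fun p => p.1 == k) = none := by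
        rw [List.find?_eq_none]
        intro p hp
        simp only [beq_iff_eq]
        intro hpk
        exact hq (List.mem_map.mpr ⟨p, hp, by rw [hpk, hk]⟩)
      rw [ih _ hnd, hfind]
      have : (q.1 == k) = true := by simp [hk]
      rw [this]
      subst hk
      simp [PySem.Dict.getD_insert_self]
    · have hbeq : (q.1 == k) = false := by simp [hk]
      rw [hbeq, ih _ hnd]
      cases t.find? (fun p => p.1 == k) with
      | some p => rfl
      | none => simp only [PySem.Dict.getD_insert_of_ne _ _ _ (Ne.symm hk)]

-- getD through B's key-registration loop: every value written is [].
theorem pv_getD_foldl_insert_nil (l : List (String × Int)) (a : PySem.Dict String (List (Int × Int)))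
    (k : String) (h : a.getD k [] = []) :
    (l.foldl (fun d p => d.insert p.1 ([] : List (Int × Int))) a).getD k [] = [] := by
  induction l generalizing a with
  | nil => exact h
  | cons q t ih =>
    simp only [List.foldl_cons]
    exact ih _ (by rw [PySem.Dict.getD_insert]; split <;> simp [h])

-- Set.update absorbs elements already present.
theorem pv_set_update_absorb (s : PySem.Set String) (xs : List String)
    (h : ∀ x ∈ xs, x ∈ s) : PySem.Set.update s xs = s := by
  rw [PySem.Set.update_eq_append_filter]
  have hnil : (PySem.Set.ofList xs).filter (fun y => !PySem.Set.contains s y) = [] := by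
    rw [List.filter_eq_nil_iff]
    intro y hy
    have hm := h y ((PySem.Set.mem_ofList xs y).mp hy)
    simpa using hm
  rw [hnil, List.append_nil]

theorem pv_find?_beq (l : List String) (k : String) (h : k ∈ l) : l.find? (· == k) = some k := by
  induction l with
  | nil => cases h
  | cons a t ih =>
    by_cases ha : a = k
    · subst ha; simp
    · rw [List.find?_cons]
      have hb : (a == k) = false := by simp [ha]
      rw [hb]
      rcases List.mem_cons.mp h with rfl | h'
      · exact absurd rfl ha
      · exact ih h'

-- The two buckets of key k agree: A sorts its per-key bucket, B filters the global sort.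
theorem pv_bucket_eq (Z : List (String × Int)) (k : String) :
    PySem.List.sorted
      (((PySem.List.enumerate Z).filter (fun p => p.2.1 == k)).map (fun p => (p.2.2, p.1)))
      (fun pair => pair.1)
    = ((PySem.List.sorted ((PySem.List.enumerate Z).map (fun p => (p.2.2, p.1, p.2.1)))
          (fun e => e.1)).filter (fun e => e.2.2 == k)).map (fun e => (e.1, e.2.1)) := by
  set E := PySem.List.enumerate Z with hEdef
  have hE : E.Pairwise (fun p q => p.1 < q.1) := by
    have := PySem.List.pairwise_lt_pyRange_one (0 : Int) (0 + (Z.length : Int))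
    rw [← PySem.List.map_fst_enumerate Z 0] at this
    exact List.pairwise_map.mp this
  have hL : (PySem.List.sorted
      ((E.filter (fun p => p.2.1 == k)).map (fun p => (p.2.2, p.1)))
      (fun pair => pair.1)).Pairwise
      (fun a b : Int × Int => a.1 < b.1 ∨ (a.1 = b.1 ∧ a.2 < b.2)) := by
    apply pv_sorted_pairwise_lex (fun pair : Int × Int => pair.1) (fun pair : Int × Int => pair.2)
    rw [List.pairwise_map]
    apply List.Pairwise.imp _ (hE.filter _)
    intro a b h
    exact fun _ => h
  have hR : (((PySem.List.sorted (E.map (fun p => (p.2.2, p.1, p.2.1)))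
        (fun e => e.1)).filter (fun e => e.2.2 == k)).map (fun e => (e.1, e.2.1))).Pairwise
      (fun a b : Int × Int => a.1 < b.1 ∨ (a.1 = b.1 ∧ a.2 < b.2)) := by
    rw [List.pairwise_map]
    have hs := (pv_sorted_pairwise_lex (fun e : Int × Int × String => e.1)
      (fun e : Int × Int × String => e.2.1)
      (E.map (fun p => (p.2.2, p.1, p.2.1)))
      (by rw [List.pairwise_map]
          apply List.Pairwise.imp _ hE
          intro a b h
          exact fun _ => h)).filter (fun e => e.2.2 == k)
    apply List.Pairwise.imp _ hs
    intro a b h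
    exact h
  have hfm : ((E.map (fun p => (p.2.2, p.1, p.2.1))).filter (fun e => e.2.2 == k)).map
      (fun e : Int × Int × String => (e.1, e.2.1))
      = (E.filter (fun p => p.2.1 == k)).map (fun p => (p.2.2, p.1)) := by
    rw [List.filter_map, List.map_map]
    rfl
  have hperm : (PySem.List.sorted
      ((E.filter (fun p => p.2.1 == k)).map (fun p => (p.2.2, p.1)))
      (fun pair => pair.1)).Perm
      (((PySem.List.sorted (E.map (fun p => (p.2.2, p.1, p.2.1)))
        (fun e => e.1)).filter (fun e => e.2.2 == k)).map (fun e => (e.1, e.2.1))) := by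
    refine (PySem.List.sorted_perm _ _ _).trans ?_
    rw [← hfm]
    exact (((PySem.List.sorted_perm _ _ _).filter _).map _).symm
  exact List.Perm.eq_of_pairwise
    (fun a b _ _ h1 h2 => by
      rcases h1 with h | ⟨e1, l1⟩ <;> rcases h2 with h' | ⟨e2, l2⟩ <;> (exfalso; omega))
    hL hR hperm

-- The whole pipeline, stated over the zipped input.
theorem pv_main (Z : List (String × Int)) :
    (((PySem.List.enumerate Z).foldl
          (fun d p => d.modify p.2.1 [] (fun l => l ++ [(p.2.2, p.1)]))
          (PySem.Dict.empty : PySem.Dict String (List (Int × Int)))).items.foldl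
        (fun d p => d.insert p.1 (PySem.List.sorted p.2 (fun pair => pair.1)))
        ((PySem.List.enumerate Z).foldl
          (fun d p => d.modify p.2.1 [] (fun l => l ++ [(p.2.2, p.1)]))
          PySem.Dict.empty)).items
    = ((PySem.List.sorted ((PySem.List.enumerate Z).map (fun p => (p.2.2, p.1, p.2.1)))
          (fun e => e.1)).foldl
        (fun d e => d.modify e.2.2 [] (fun l => l ++ [(e.1, e.2.1)]))
        (Z.foldl (fun d p => d.insert p.1 ([] : List (Int × Int))) PySem.Dict.empty)).items := by
  set E := PySem.List.enumerate Z with hEdef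
  set K := PySem.Set.ofList (Z.map (fun q => q.1)) with hKdef
  set m := E.foldl (fun d p => d.modify p.2.1 [] (fun l => l ++ [(p.2.2, p.1)]))
      (PySem.Dict.empty : PySem.Dict String (List (Int × Int))) with hmdef
  set m2 := m.items.foldl
      (fun d p => d.insert p.1 (PySem.List.sorted p.2 (fun pair => pair.1))) m with hm2def
  set sortedE := PySem.List.sorted (E.map (fun p => (p.2.2, p.1, p.2.1))) (fun e => e.1) with hSdef
  set m0 := Z.foldl (fun d p => d.insert p.1 ([] : List (Int × Int)))
      (PySem.Dict.empty : PySem.Dict String (List (Int × Int))) with hm0def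
  set mB := sortedE.foldl (fun d e => d.modify e.2.2 [] (fun l => l ++ [(e.1, e.2.1)])) m0 with hBdef
  have hm21 : E.map (fun p => p.2.1) = Z.map (fun q => q.1) := by
    conv_rhs => rw [← PySem.List.map_snd_enumerate Z 0]
    rw [List.map_map, ← hEdef]
    rfl
  have hmkeys : m.keys = K := by
    rw [hmdef, PySem.Dict.keys_foldl_modify_key (key := fun p : Int × String × Int => p.2.1)
        (f := fun d p => fun l => l ++ [(p.2.2, p.1)]),
      PySem.Dict.keys_empty, PySem.Set.update_nil_left, hm21]
  have hmnodup : m.keys.Nodup := by rw [hmkeys, hKdef]; exact PySem.Set.nodup_ofList _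
  have hmgetD : ∀ k, m.getD k [] = (E.filter (fun p => p.2.1 == k)).map (fun p => (p.2.2, p.1)) := by
    intro k
    have h1 : m = ((E.map (fun p => (p.2.1, ((p.2.2, p.1) : Int × Int)))).foldl
        (fun d q => d.modify q.1 [] (fun l => l ++ [q.2])) PySem.Dict.empty) := by
      rw [hmdef, List.foldl_map]
    rw [h1, PySem.Dict.getD_foldl_modify_append, PySem.Dict.getD_empty, List.nil_append,
        List.filter_map, List.map_map]
    rfl
  have hitems1 : m.items.map (fun p => p.1) = m.keys := rfl
  have hm2keys : m2.keys = K := by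
    rw [hm2def, PySem.Dict.keys_foldl_insert_key (key := fun p : String × List (Int × Int) => p.1)
        (f := fun d p => PySem.List.sorted p.2 (fun pair => pair.1)), hitems1, hmkeys]
    exact pv_set_update_absorb _ _ (fun x hx => hx)
  have hm2nodup : m2.keys.Nodup := by rw [hm2keys, hKdef]; exact PySem.Set.nodup_ofList _
  have hm2getD : ∀ k, k ∈ K → m2.getD k []
      = PySem.List.sorted ((E.filter (fun p => p.2.1 == k)).map (fun p => (p.2.2, p.1)))
          (fun pair => pair.1) := by
    intro k hk
    have hnd : (m.items.map (·.1)).Nodup := by rw [hitems1]; exact hmnodup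
    have hfold := pv_getD_foldl_insert_find m.items
      (fun v => PySem.List.sorted v (fun pair => pair.1)) m k [] hnd
    have hfind : m.items.find? (fun p => p.1 == k) = some (k, m.getD k []) := by
      rw [PySem.Dict.items_eq_map_keys m hmnodup [], List.find?_map]
      have hcomp : ((fun p : String × List (Int × Int) => p.1 == k)
          ∘ (fun k0 => (k0, m.getD k0 []))) = (· == k) := rfl
      rw [hcomp, pv_find?_beq m.keys k (by rw [hmkeys]; exact hk)]
      rfl
    rw [hfind] at hfold
    rw [hm2def]
    exact hfold.trans (by rw [hmgetD k])
  have hAitems : m2.items = K.map (fun k =>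
      (k, PySem.List.sorted ((E.filter (fun p => p.2.1 == k)).map (fun p => (p.2.2, p.1)))
            (fun pair => pair.1))) := by
    rw [PySem.Dict.items_eq_map_keys m2 hm2nodup [], hm2keys]
    exact List.map_congr_left (fun k hk => by rw [hm2getD k hk])
  have hm0getD : ∀ k, m0.getD k [] = [] := by
    intro k
    rw [hm0def]
    exact pv_getD_foldl_insert_nil Z _ k (PySem.Dict.getD_empty _ _)
  have hm0keys : m0.keys = K := by
    rw [hm0def, PySem.Dict.keys_foldl_insert_key (key := fun p : String × Int => p.1)
        (f := fun d p => ([] : List (Int × Int))),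
      PySem.Dict.keys_empty, PySem.Set.update_nil_left]
  have hBkeys : mB.keys = K := by
    rw [hBdef, PySem.Dict.keys_foldl_modify_key (key := fun e : Int × Int × String => e.2.2)
        (f := fun d e => fun l => l ++ [(e.1, e.2.1)]), hm0keys]
    apply pv_set_update_absorb
    intro x hx
    obtain ⟨e, he, rfl⟩ := List.mem_map.mp hx
    rw [hSdef] at he
    have he2 := (PySem.List.mem_sorted _ _ _ _).mp he
    obtain ⟨p, hp, rfl⟩ := List.mem_map.mp he2
    rw [hKdef]
    apply (PySem.Set.mem_ofList _ _).mpr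
    rw [← hm21]
    exact List.mem_map_of_mem hp
  have hBnodup : mB.keys.Nodup := by rw [hBkeys, hKdef]; exact PySem.Set.nodup_ofList _
  have hBgetD : ∀ k, mB.getD k [] = (sortedE.filter (fun e => e.2.2 == k)).map
      (fun e => (e.1, e.2.1)) := by
    intro k
    have h1 : sortedE.foldl (fun d e => d.modify e.2.2 [] (fun l => l ++ [(e.1, e.2.1)])) m0
        = ((sortedE.map (fun e => (e.2.2, ((e.1, e.2.1) : Int × Int)))).foldl
            (fun d q => d.modify q.1 [] (fun l => l ++ [q.2])) m0) := by
      rw [List.foldl_map]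
    rw [hBdef, h1, PySem.Dict.getD_foldl_modify_append, hm0getD, List.nil_append,
        List.filter_map, List.map_map]
    rfl
  have hBitems : mB.items = K.map (fun k =>
      (k, (sortedE.filter (fun e => e.2.2 == k)).map (fun e => (e.1, e.2.1)))) := by
    rw [PySem.Dict.items_eq_map_keys mB hBnodup [], hBkeys]
    exact List.map_congr_left (fun k hk => by rw [hBgetD k])
  rw [hAitems, hBitems]
  apply List.map_congr_left
  intro k hk
  rw [hSdef, hEdef]
  exact congrArg (fun v => (k, v)) (pv_bucket_eq Z k)

-- ===== VERDICT (by name: the statement is the Claim_ definition above) =====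
theorem build_article_index_spec : Claim_equal_build_article_index := by
  intro batch_ids seq _
  unfold Spec_build_article_index build_article_index build_article_index_alt
  exact pv_main (batch_ids.zip seq)
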